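-- pv_equiv track=rewrite | github.com/sameersismail/ark | ark/utils.py | add_cloze
-- ===== SOURCE A (Python) =====
-- ANKI_START = '{{c1::'
--
-- ANKI_END = '}}'
--
-- def add_cloze(text: str) -> str:
--     """Replace custom enclosing characters with Anki delimiters."""
--     flip = True
--     chars = list(text)
--
--     for i in range(len(chars) - 1):
--         if (chars[i] == '~') and (chars[i + 1] == '~'):
--             chars[i] = ANKI_START if flip else ANKI_END
--             chars[i + 1] = ""
--             flip ^= True
--
--     return "".join(chars) if (flip == True) else text
-- ===== SOURCE B (Python) =====
-- ANKI_START = '{{c1::'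
--
-- ANKI_END = '}}'
--
-- def add_cloze(text: str) -> str:
--     """Replace custom enclosing characters with Anki delimiters."""
--     parts = text.split('~~')
--     if len(parts) % 2 == 0:  # odd number of '~~' delimiters: leave text as-is
--         return text
--     out = [parts[0]]
--     for i, part in enumerate(parts[1:]):
--         out.append(ANKI_START if i % 2 == 0 else ANKI_END)
--         out.append(part)
--     return ''.join(out)
-- ===== Notes on version B (the rewrite author's own statement) =====
-- stated objective: simpler
-- what changed: Replaces the mutable char-array scan with index lookahead by a split on the delimiter pair followed by reassembly with alternating markers (text returned unchanged when the delimiter count is odd).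
import Mathlib
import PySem

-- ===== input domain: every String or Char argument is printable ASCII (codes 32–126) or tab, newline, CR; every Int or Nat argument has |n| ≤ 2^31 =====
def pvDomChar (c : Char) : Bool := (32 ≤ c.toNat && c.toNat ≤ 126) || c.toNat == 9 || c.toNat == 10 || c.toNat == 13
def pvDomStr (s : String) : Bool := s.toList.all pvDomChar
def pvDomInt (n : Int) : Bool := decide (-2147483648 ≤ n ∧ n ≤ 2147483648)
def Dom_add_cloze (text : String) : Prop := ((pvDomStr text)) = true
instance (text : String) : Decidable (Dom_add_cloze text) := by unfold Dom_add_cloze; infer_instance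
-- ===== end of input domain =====

-- B replaces A's mutable char-array scan with lookahead by a split on "~~" plus
-- reassembly with alternating markers; objective: simpler.


-- ===== PORT A =====
-- body of A's `for i in range(len(chars) - 1)` loop, acting on the state (chars, flip)
def pvStepA (st : List String × Bool) (i : Int) : List String × Bool :=
  if PySem.List.pyGetD st.1 i "" = "~" ∧ PySem.List.pyGetD st.1 (i + 1) "" = "~" then
    ((st.1.set i.toNat (if st.2 then "{{c1::" else "}}")).set (i.toNat + 1) "", !st.2)
  else st

def add_cloze (text : String) : String :=
  let chars := text.toList.map (fun c => String.ofList [c])   -- list(text)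
  let st := (PySem.List.pyRange 0 ((chars.length : Int) - 1) 1).foldl pvStepA (chars, true)
  if st.2 = true then PySem.Str.join "" st.1 else text

-- ===== PORT B =====
def add_cloze_alt (text : String) : String :=
  -- text.split('~~'): split? with the non-empty literal separator always returns `some`, unwrapped here
  let parts := (PySem.Chars.splitOn text.toList "~~".toList).map String.ofList
  if parts.length % 2 = 0 then text
  else
    let out := (PySem.List.enumerate (parts.drop 1)).foldl
      (fun acc ip => acc ++ [if PySem.Int.mod ip.1 2 = 0 then "{{c1::" else "}}", ip.2])
      [PySem.List.pyGetD parts 0 ""]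
    PySem.Str.join "" out

-- ===== PRECONDITION & SPEC =====
def Spec_add_cloze (text : String) (out : String) : Prop := out = add_cloze_alt text
instance (text : String) (out : String) : Decidable (Spec_add_cloze text out) := by unfold Spec_add_cloze; infer_instance

-- ===== CLAIM (what is proved, stated in full; the proofs are below) =====
def Claim_equal_add_cloze : Prop := ∀ (text : String), Dom_add_cloze text → Spec_add_cloze text (add_cloze text)

-- ===== LEMMAS AND PROOFS =====

-- A's loop, as a structural recursion on the suffix not yet scanned
def pvCoreS : List String → Bool → List String × Bool
  | [], f => ([], f)
  | [x], f => ([x], f)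
  | x :: y :: rest, f =>
    if x = "~" ∧ y = "~" then
      let r := pvCoreS ("" :: rest) (!f)
      ((if f then "{{c1::" else "}}") :: r.1, r.2)
    else
      let r := pvCoreS (y :: rest) f
      (x :: r.1, r.2)
termination_by l _ => l.length

-- the same scan on plain characters, output flattened
def pvCore : List Char → Bool → List Char × Bool
  | [], f => ([], f)
  | [c], f => ([c], f)
  | a :: b :: rest, f =>
    if a = '~' ∧ b = '~' then
      let r := pvCore rest (!f)
      ((if f then "{{c1::" else "}}").toList ++ r.1, r.2)
    else
      let r := pvCore (b :: rest) f
      (a :: r.1, r.2)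
termination_by l _ => l.length

-- pure recursion computing Python's split on '~~'
def pvSp : List Char → List (List Char)
  | [] => [[]]
  | a :: rest =>
    if a = '~' ∧ rest.head? = some '~' then [] :: pvSp rest.tail
    else (pvSp rest).modifyHead (a :: ·)
termination_by l => l.length
decreasing_by
  · simp [List.length_tail]
  · simp

-- pieces after the first one, prefixed with alternating markers
def pvAsmT : Bool → List (List Char) → List Char
  | _, [] => []
  | f, p :: ps => (if f then "{{c1::" else "}}").toList ++ p ++ pvAsmT (!f) ps

def pvAsm (f : Bool) (ps : List (List Char)) : List Char :=
  match ps with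
  | [] => []
  | p :: rest => p ++ pvAsmT f rest

theorem pvJoinNilFlatten (xss : List (List Char)) : PySem.Chars.join [] xss = xss.flatten := by
  induction xss with
  | nil => simp [PySem.Chars.join_nil]
  | cons p rest ih =>
    cases rest with
    | nil => simp [PySem.Chars.join_singleton]
    | cons q rs => simp only [PySem.Chars.join_cons_cons] at *; simp [ih]

theorem pvSp_ne_nil (cs : List Char) : pvSp cs ≠ [] := by
  induction hn : cs.length using Nat.strong_induction_on generalizing cs with
  | _ n ih =>
    cases cs with
    | nil => simp [pvSp]
    | cons a rest =>
      rw [pvSp]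
      split
      · simp
      · have := ih rest.length (by simp [hn.symm]) rest rfl
        cases h : pvSp rest with
        | nil => exact absurd h this
        | cons p ps => simp

theorem pvSplitOnGo (fuel : Nat) (l cur : List Char) (acc : List (List Char)) (h : l.length ≤ fuel) :
    PySem.Chars.splitOn.go ['~','~'] fuel l cur acc
      = acc.reverse ++ (pvSp l).modifyHead (cur.reverse ++ ·) := by
  induction fuel generalizing l cur acc with
  | zero =>
    have : l = [] := by cases l <;> simp_all
    subst this
    rw [PySem.Chars.splitOn.go.eq_def]
    simp [pvSp]
  | succ fuel ih =>
    cases l with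
    | nil => rw [PySem.Chars.splitOn.go.eq_def]; simp [pvSp]
    | cons c rest =>
      rw [PySem.Chars.splitOn.go.eq_def]
      simp only []
      by_cases hp : c = '~' ∧ rest.head? = some '~'
      · have hpre : ['~','~'].isPrefixOf (c :: rest) = true := by
          obtain ⟨rfl, h2⟩ := hp
          cases rest with
          | nil => simp at h2
          | cons b rs => simp at h2; subst h2; simp [List.isPrefixOf]
        rw [if_pos hpre, ih _ _ _ (by simp at h ⊢; omega)]
        rw [pvSp, if_pos hp]
        cases rest with
        | nil => simp_all
        | cons b rs =>
          cases hsp : pvSp rs with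
          | nil => exact absurd hsp (pvSp_ne_nil rs)
          | cons p ps => simp [hsp]
      · have hpre : ['~','~'].isPrefixOf (c :: rest) = false := by
          cases rest with
          | nil => simp [List.isPrefixOf]
          | cons b rs =>
            simp [List.isPrefixOf]
            intro h1 h2
            exact absurd ⟨h1.symm, by simp [h2.symm]⟩ hp
        rw [if_neg (by simp [hpre]), ih _ _ _ (by simp at h ⊢; omega)]
        rw [pvSp, if_neg hp]
        cases hsp : pvSp rest with
        | nil => exact absurd hsp (pvSp_ne_nil rest)
        | cons p ps => simp

theorem pvSplitOnEq (cs : List Char) : PySem.Chars.splitOn cs ['~','~'] = pvSp cs := by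
  rw [PySem.Chars.splitOn, pvSplitOnGo _ _ _ _ (by omega)]
  cases h : pvSp cs with
  | nil => exact absurd h (pvSp_ne_nil cs)
  | cons p ps => simp

theorem pvGetAt (pre l : List String) (x : String) :
    PySem.List.pyGetD (pre ++ x :: l) (pre.length : Int) "" = x := by
  rw [PySem.List.pyGetD_natCast]
  simp

theorem pvGetAt1 (pre l : List String) (x y : String) :
    PySem.List.pyGetD (pre ++ x :: y :: l) ((pre.length : Int) + 1) "" = y := by
  have h : ((pre.length : Int) + 1) = ((pre.length + 1 : Nat) : Int) := by push_cast; ring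
  rw [h, PySem.List.pyGetD_natCast, List.getD_append_right _ _ _ _ (by omega)]
  simp

theorem pvSetAt (pre l : List String) (x m : String) :
    (pre ++ x :: l).set pre.length m = pre ++ m :: l := by
  rw [List.set_append]
  simp

theorem pvLoop (n : Nat) (suf pre : List String) (f : Bool) (hn : suf.length = n) :
    (PySem.List.pyRange (pre.length : Int) ((pre.length : Int) + (suf.length : Int) - 1) 1).foldl
        pvStepA (pre ++ suf, f)
      = (pre ++ (pvCoreS suf f).1, (pvCoreS suf f).2) := by
  induction n using Nat.strong_induction_on generalizing suf pre f with
  | _ n ih =>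
    rcases suf with _ | ⟨x, _ | ⟨y, rest⟩⟩
    · rw [PySem.List.pyRange_one_eq_nil (by simp)]; simp [pvCoreS]
    · rw [PySem.List.pyRange_one_eq_nil (by simp)]; simp [pvCoreS]
    · simp only [List.length_cons] at hn
      rw [PySem.List.pyRange_one_cons (by simp only [List.length_cons]; push_cast; omega)]
      rw [List.foldl_cons]
      by_cases hm : x = "~" ∧ y = "~"
      · have hstep : pvStepA (pre ++ x :: y :: rest, f) (pre.length : Int)
            = ((pre ++ [if f then "{{c1::" else "}}"]) ++ "" :: rest, !f) := by
          rw [pvStepA]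
          rw [if_pos ⟨(pvGetAt pre (y :: rest) x).trans hm.1,
                      (pvGetAt1 pre rest x y).trans hm.2⟩]
          simp only [Int.toNat_natCast]
          rw [pvSetAt]
          rw [show (pre ++ (if f then "{{c1::" else "}}") :: y :: rest)
              = ((pre ++ [if f then "{{c1::" else "}}"]) ++ y :: rest) by simp]
          rw [show pre.length + 1 = (pre ++ [if f then "{{c1::" else "}}"]).length by simp]
          rw [pvSetAt]
        rw [hstep]
        rw [show ((pre.length : Int) + 1) = (((pre ++ [if f then "{{c1::" else "}}"]).length : Nat) : Int) by simp]
        rw [show ((pre.length : Int) + ((x :: y :: rest).length : Int) - 1)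
            = (((pre ++ [if f then "{{c1::" else "}}"]).length : Int) + ((("" : String) :: rest).length : Int) - 1) by
          simp; ring]
        rw [ih (rest.length + 1) (by omega) ("" :: rest) _ (!f) (by simp)]
        rw [pvCoreS, if_pos hm]
        simp
      · have hstep : pvStepA (pre ++ x :: y :: rest, f) (pre.length : Int) = (pre ++ x :: y :: rest, f) := by
          rw [pvStepA, if_neg]
          intro hc
          exact hm ⟨(pvGetAt pre (y :: rest) x).symm.trans hc.1,
                    (pvGetAt1 pre rest x y).symm.trans hc.2⟩
        rw [hstep]
        rw [show pre ++ x :: y :: rest = (pre ++ [x]) ++ y :: rest by simp]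
        rw [show ((pre.length : Int) + 1) = (((pre ++ [x]).length : Nat) : Int) by simp]
        rw [show ((pre.length : Int) + ((x :: y :: rest).length : Int) - 1)
            = (((pre ++ [x]).length : Int) + ((y :: rest).length : Int) - 1) by simp; ring]
        rw [ih (rest.length + 1) (by omega) (y :: rest) _ f (by simp)]
        rw [pvCoreS, if_neg hm]
        simp

theorem pvCoreS_nil_cons (l : List String) (f : Bool) :
    pvCoreS ("" :: l) f = ("" :: (pvCoreS l f).1, (pvCoreS l f).2) := by
  cases l with
  | nil => rw [pvCoreS, pvCoreS]
  | cons y rs =>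
    rw [pvCoreS, if_neg (by simp)]

theorem pvMapChar (n : Nat) (cs : List Char) (f : Bool) (hn : cs.length = n) :
    (((pvCoreS (cs.map (fun c => String.ofList [c])) f).1.map String.toList).flatten
        = (pvCore cs f).1)
      ∧ (pvCoreS (cs.map (fun c => String.ofList [c])) f).2 = (pvCore cs f).2 := by
  induction n using Nat.strong_induction_on generalizing cs f with
  | _ n ih =>
    rcases cs with _ | ⟨a, _ | ⟨b, rest⟩⟩
    · simp [pvCoreS, pvCore]
    · simp [pvCoreS, pvCore]
    · simp only [List.length_cons] at hn
      rw [List.map_cons, List.map_cons]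
      by_cases hm : a = '~' ∧ b = '~'
      · have hsm : String.ofList [a] = "~" ∧ String.ofList [b] = "~" := by
          obtain ⟨rfl, rfl⟩ := hm; exact ⟨rfl, rfl⟩
        rw [pvCoreS, if_pos hsm, pvCore, if_pos hm]
        have h1 := pvCoreS_nil_cons (rest.map (fun c => String.ofList [c])) (!f)
        have h2 := ih rest.length (by omega) rest (!f) rfl
        simp only [h1]
        constructor
        · simp only [List.map_cons, List.flatten_cons]
          rw [h2.1]
          cases f <;> simp
        · exact h2.2
      · have hsm : ¬(String.ofList [a] = "~" ∧ String.ofList [b] = "~") := by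
          intro ⟨h1, h2⟩
          apply hm
          constructor
          · have := congrArg String.toList h1; simpa using this
          · have := congrArg String.toList h2; simpa using this
        have hcc : pvCore (a :: b :: rest) f
            = (a :: (pvCore (b :: rest) f).1, (pvCore (b :: rest) f).2) := by
          rw [pvCore, if_neg hm]
        rw [pvCoreS, if_neg hsm, hcc]
        have h2 := ih (rest.length + 1) (by omega) (b :: rest) f (by simp)
        simp only [List.map_cons] at h2
        constructor
        · simp only [List.map_cons, List.flatten_cons]
          rw [h2.1]
          simp
        · exact h2.2

theorem pvCore_cons (a : Char) (rest : List Char) (f : Bool)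
    (h : ¬(a = '~' ∧ rest.head? = some '~')) :
    pvCore (a :: rest) f = (a :: (pvCore rest f).1, (pvCore rest f).2) := by
  cases rest with
  | nil => rw [pvCore, pvCore]
  | cons b rs =>
    rw [pvCore, if_neg (by simpa using h)]

theorem pvAsmT_eq (f : Bool) (ps : List (List Char)) (h : ps ≠ []) :
    (if f then "{{c1::" else "}}").toList ++ pvAsm (!f) ps = pvAsmT f ps := by
  cases ps with
  | nil => exact absurd rfl h
  | cons p rs => simp [pvAsm, pvAsmT]

theorem pvAsm_modifyHead (f : Bool) (a : Char) (ps : List (List Char)) (h : ps ≠ []) :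
    pvAsm f (ps.modifyHead (a :: ·)) = a :: pvAsm f ps := by
  cases ps with
  | nil => exact absurd rfl h
  | cons p rs => simp [pvAsm]

theorem pvCoreSp (n : Nat) (cs : List Char) (f : Bool) (hn : cs.length = n) :
    pvCore cs f = (pvAsm f (pvSp cs), if (pvSp cs).length % 2 = 1 then f else !f) := by
  induction n using Nat.strong_induction_on generalizing cs f with
  | _ n ih =>
    cases cs with
    | nil => simp [pvCore, pvSp, pvAsm, pvAsmT]
    | cons a rest =>
      simp only [List.length_cons] at hn
      by_cases hp : a = '~' ∧ rest.head? = some '~'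
      · obtain ⟨rfl, hh⟩ := hp
        rcases rest with _ | ⟨b, rs⟩
        · simp at hh
        · simp only [List.head?_cons, Option.some.injEq] at hh
          subst hh
          rw [pvSp, if_pos (by simp)]
          simp only [List.tail_cons]
          rw [pvCore, if_pos (by simp)]
          have h2 := ih rs.length (by simp at hn; omega) rs (!f) rfl
          rw [h2]
          simp only [Prod.mk.injEq]
          constructor
          · show _ = pvAsm f ([] :: pvSp rs)
            rw [show pvAsm f ([] :: pvSp rs) = pvAsmT f (pvSp rs) by simp [pvAsm]]
            rw [← pvAsmT_eq f (pvSp rs) (pvSp_ne_nil rs)]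
          · show (if (pvSp rs).length % 2 = 1 then !f else !(!f))
              = if ([] :: pvSp rs).length % 2 = 1 then f else !f
            simp only [List.length_cons]
            rcases Nat.mod_two_eq_zero_or_one (pvSp rs).length with h | h <;>
              simp [h, Nat.add_mod]
      · rw [pvSp, if_neg hp, pvCore_cons a rest f hp]
        have h2 := ih rest.length (by omega) rest f rfl
        rw [h2]
        simp only [Prod.mk.injEq]
        constructor
        · show _ = pvAsm f ((pvSp rest).modifyHead (a :: ·))
          rw [pvAsm_modifyHead f a _ (pvSp_ne_nil rest)]
        · show (if (pvSp rest).length % 2 = 1 then f else !f)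
            = if ((pvSp rest).modifyHead (a :: ·)).length % 2 = 1 then f else !f
          simp [List.length_modifyHead]

theorem pvEnumFold (ps : List String) (k : Nat) (acc : List String) (f : Bool)
    (hf : f = true ↔ k % 2 = 0) :
    (((PySem.List.enumerate ps (k : Int)).foldl
        (fun acc ip => acc ++ [if PySem.Int.mod ip.1 2 = 0 then "{{c1::" else "}}", ip.2])
        acc).map String.toList).flatten
      = (acc.map String.toList).flatten ++ pvAsmT f (ps.map String.toList) := by
  induction ps generalizing k acc f with
  | nil => simp [PySem.List.enumerate, pvAsmT]
  | cons p rest ih =>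
    rw [show PySem.List.enumerate (p :: rest) (k : Int)
        = ((k : Int), p) :: PySem.List.enumerate rest ((k : Int) + 1) from rfl]
    rw [List.foldl_cons]
    have hk1 : ((k : Int) + 1) = (((k + 1 : Nat)) : Int) := by push_cast; ring
    have hmod : (PySem.Int.mod (k : Int) 2 = 0) ↔ (k % 2 = 0) := by
      rw [show ((2 : Int)) = ((2 : Nat) : Int) by norm_num, PySem.Int.mod_natCast]
      omega
    rw [hk1, ih (k + 1) _ (!f) (by cases f <;> simp_all <;> omega)]
    have hif : (if PySem.Int.mod (k : Int) 2 = 0 then ("{{c1::" : String) else "}}")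
        = (if f then "{{c1::" else "}}") := by
      by_cases h : k % 2 = 0
      · rw [if_pos (hmod.mpr h), if_pos (hf.mpr h)]
      · rw [if_neg (fun hc => h (hmod.mp hc)), if_neg (by simp_all)]
    rw [hif]
    simp [pvAsmT]

-- ===== VERDICT (by name: the statement is the Claim_ definition above) =====
theorem add_cloze_spec : Claim_equal_add_cloze := by
  intro text _
  unfold Spec_add_cloze add_cloze add_cloze_alt
  simp only []
  have hA := pvLoop (text.toList.map (fun c => String.ofList [c])).length
      (text.toList.map (fun c => String.ofList [c])) [] true rfl
  simp only [List.nil_append, List.length_nil, Nat.cast_zero, zero_add] at hA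
  rw [hA]
  have hMC := pvMapChar text.toList.length text.toList true rfl
  have hCS := pvCoreSp text.toList.length text.toList true rfl
  rw [show ("~~" : String).toList = ['~','~'] from rfl, pvSplitOnEq]
  cases hsp : pvSp text.toList with
  | nil => exact absurd hsp (pvSp_ne_nil text.toList)
  | cons h t =>
    rw [hsp] at hCS
    rcases Nat.mod_two_eq_zero_or_one (h :: t).length with hpar | hpar
    · -- even number of pieces, i.e. an odd number of '~~': both return text unchanged
      have hA2 : (pvCoreS (text.toList.map (fun c => String.ofList [c])) true).2 = false := by
        rw [hMC.2, hCS, if_neg (by omega)]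
        rfl
      rw [hA2, if_neg (by simp)]
      rw [if_pos (by simp only [List.length_map]; exact hpar)]
    · -- odd number of pieces: both return the reassembled string
      have hA2 : (pvCoreS (text.toList.map (fun c => String.ofList [c])) true).2 = true := by
        rw [hMC.2, hCS, if_pos hpar]
      rw [hA2, if_pos rfl]
      rw [if_neg (by simp only [List.length_map]; omega)]
      rw [PySem.Str.join, PySem.Str.join]
      rw [show ("" : String).toList = [] from rfl]
      rw [pvJoinNilFlatten, pvJoinNilFlatten]
      rw [hMC.1, hCS]
      simp only []
      have hEF := pvEnumFold (((h :: t).map String.ofList).drop 1) 0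
        [PySem.List.pyGetD ((h :: t).map String.ofList) 0 ""] true (by simp)
      rw [show ((0 : Nat) : Int) = (0 : Int) from rfl] at hEF
      rw [hEF]
      have hget : PySem.List.pyGetD ((h :: t).map String.ofList) 0 "" = String.ofList h := by
        rw [show (0 : Int) = ((0 : Nat) : Int) from rfl, PySem.List.pyGetD_natCast]
        simp
      rw [hget]
      have hdrop : ((((h :: t).map String.ofList).drop 1).map String.toList) = t := by
        simp [Function.comp_def]
      rw [hdrop]
      simp [pvAsm]
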